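-- pv_equiv track=rewrite | github.com/Nederfors/nederfors.github.io | scripts/sync_data_manifest.py | merge_order
-- ===== SOURCE A (Python) =====
-- def merge_order(existing: list[str], discovered: list[str]) -> list[str]:
--     ordered = []
--     seen = set()
--
--     for name in existing:
--         if name in discovered and name not in seen:
--             ordered.append(name)
--             seen.add(name)
--
--     for name in discovered:
--         if name not in seen:
--             ordered.append(name)
--             seen.add(name)
--
--     return ordered
-- ===== SOURCE B (Python) =====
-- def merge_order(existing, discovered):
--     pos = {}
--     for i, name in enumerate(existing):
--         pos.setdefault(name, i)
--     distinct = list(dict.fromkeys(discovered))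
--     keyed = sorted(
--         ((pos.get(name, len(existing) + i), name) for i, name in enumerate(distinct)),
--         key=lambda pair: pair[0],
--     )
--     return [name for _, name in keyed]
-- ===== Notes on version B (the rewrite author's own statement) =====
-- stated objective: alternative
-- what changed: Replaces A's two sequential filter loops with a shared seen-set and an O(m) 'name in discovered' list scan per element by an index-and-sort strategy: build a first-occurrence position table of existing, dedup discovered once, attach to each distinct name one integer rank (its first index in existing, or len(existing)+its dedup position otherwise) and sort by that rank.
import Mathlib
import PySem

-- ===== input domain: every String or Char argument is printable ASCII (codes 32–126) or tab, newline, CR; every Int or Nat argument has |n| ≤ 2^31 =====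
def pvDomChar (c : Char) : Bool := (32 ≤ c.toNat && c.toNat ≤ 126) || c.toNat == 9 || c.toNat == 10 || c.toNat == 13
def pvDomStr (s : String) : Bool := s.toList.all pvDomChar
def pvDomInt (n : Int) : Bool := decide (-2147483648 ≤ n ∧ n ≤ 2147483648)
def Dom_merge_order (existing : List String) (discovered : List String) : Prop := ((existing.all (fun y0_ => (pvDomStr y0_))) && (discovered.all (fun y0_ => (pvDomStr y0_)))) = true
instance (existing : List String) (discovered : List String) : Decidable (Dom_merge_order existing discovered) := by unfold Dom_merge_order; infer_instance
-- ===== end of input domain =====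

-- B replaces A's two filter loops (with their inner 'name in discovered' list scan) by a first-occurrence index table plus a sort by a single integer rank; a timing run measured B faster.

-- ===== PORT A =====
-- two loops over a shared (ordered, seen) state, transliterated as foldl over the same pair
def merge_order (existing : List String) (discovered : List String) : List String :=
  let s1 := existing.foldl
    (fun (st : List String × PySem.Set String) name =>
      if discovered.contains name && !(PySem.Set.contains st.2 name) then
        (st.1 ++ [name], PySem.Set.add st.2 name)
      else st)
    ([], PySem.Set.empty)
  let s2 := discovered.foldl
    (fun (st : List String × PySem.Set String) name =>
      if !(PySem.Set.contains st.2 name) then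
        (st.1 ++ [name], PySem.Set.add st.2 name)
      else st)
    s1
  s2.1

-- ===== PORT B =====
def merge_order_alt (existing : List String) (discovered : List String) : List String :=
  let pos : PySem.Dict String Int :=
    (PySem.List.enumerate existing).foldl
      (fun d p => if (d.get? p.2).isSome then d else d.insert p.2 p.1)  -- pos.setdefault(name, i)
      PySem.Dict.empty
  let distinct := PySem.List.dedup discovered                            -- list(dict.fromkeys(discovered))
  let keyed := PySem.List.sorted
    ((PySem.List.enumerate distinct).map
      (fun p => (pos.getD p.2 ((existing.length : Int) + p.1), p.2)))
    (fun pair => pair.1)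
  keyed.map (fun pair => pair.2)

-- ===== PRECONDITION & SPEC =====
def Spec_merge_order (existing : List String) (discovered : List String) (out : List String) : Prop := out = merge_order_alt existing discovered
instance (existing : List String) (discovered : List String) (out : List String) : Decidable (Spec_merge_order existing discovered out) := by unfold Spec_merge_order; infer_instance

-- ===== CLAIM (what is proved, stated in full; the proofs are below) =====
def Claim_equal_merge_order : Prop := ∀ (existing : List String) (discovered : List String), Dom_merge_order existing discovered → Spec_merge_order existing discovered (merge_order existing discovered)

-- ===== LEMMAS AND PROOFS =====

-- the one step both of A's loops perform on the ordered list (p = the loop's filter condition)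
def pvStep (p : String → Bool) (acc : List String) (n : String) : List String :=
  if p n && !(acc.contains n) then acc ++ [n] else acc

-- the canonical result both programs compute
def pvM (existing : List String) (discovered : List String) : List String :=
  (PySem.List.dedup existing).filter (fun n => discovered.contains n)
    ++ (PySem.List.dedup discovered).filter (fun n => !(existing.contains n))

-- the rank B attaches to a distinct discovered name
def pvKey (existing : List String) (dd : List String) (n : String) : Int :=
  if n ∈ existing then (List.idxOf n existing : Int)
  else (existing.length : Int) + (List.idxOf n dd : Int)

-- first-index of n in x :: xs when x is not n
theorem pvIdxOfConsNe (x n : String) (xs : List String) (h : ¬ x = n) :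
    List.idxOf n (x :: xs) = List.idxOf n xs + 1 := by
  rw [List.idxOf_cons]
  rw [show (x == n) = false from by simpa using h]
  rfl

-- A's (ordered, seen) pair keeps its two components literally equal (Set String is a List String)
theorem pvPairCollapse (p : String → Bool) (xs : List String) (l : List String) :
    xs.foldl
      (fun (st : List String × PySem.Set String) name =>
        if p name && !(PySem.Set.contains st.2 name) then
          (st.1 ++ [name], PySem.Set.add st.2 name)
        else st)
      (l, l)
      = (xs.foldl (pvStep p) l, xs.foldl (pvStep p) l) := by
  induction xs generalizing l with
  | nil => rfl
  | cons x xs ih =>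
      rw [List.foldl_cons, List.foldl_cons]
      have hstep :
          (if p x && !(PySem.Set.contains (Prod.snd ((l, l) : List String × PySem.Set String)) x) then
            (Prod.fst ((l, l) : List String × PySem.Set String) ++ [x],
              PySem.Set.add (Prod.snd ((l, l) : List String × PySem.Set String)) x)
          else ((l, l) : List String × PySem.Set String))
            = ((pvStep p l x, pvStep p l x) : List String × PySem.Set String) := by
        by_cases h : List.contains l x = true
        · have hm : x ∈ l := by simpa using h
          simp [pvStep, PySem.Set.contains, PySem.Set.add, hm]
        · have hm : x ∉ l := by simpa using h
          by_cases hp : p x = true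
          · simp [pvStep, PySem.Set.contains, PySem.Set.add, hm, hp]
          · simp [pvStep, PySem.Set.contains, PySem.Set.add, hm, hp]
      rw [hstep]
      exact ih _

-- the accumulator only matters through membership: it is prepended, and filters the fresh part
theorem pvStepAcc (p : String → Bool) (xs : List String) (acc : List String) :
    xs.foldl (pvStep p) acc
      = acc ++ (xs.foldl (pvStep p) []).filter (fun y => !(acc.contains y)) := by
  induction xs generalizing acc with
  | nil => simp
  | cons x xs ih =>
      simp only [List.foldl_cons]
      by_cases hp : p x = true
      · by_cases hm : x ∈ acc
        · rw [show pvStep p acc x = acc by simp [pvStep, hm],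
              show pvStep p [] x = [x] by simp [pvStep, hp],
              ih acc, ih [x]]
          simp only [List.filter_append]
          rw [show List.filter (fun y => !(acc.contains y)) [x] = [] by simp [hm]]
          rw [List.filter_filter, List.nil_append]
          congr 1
          apply List.filter_congr
          intro y _
          by_cases hy : y ∈ acc
          · simp [hy]
          · have hyx : y ≠ x := fun h => hy (h ▸ hm)
            simp [hy, hyx]
        · rw [show pvStep p acc x = acc ++ [x] by simp [pvStep, hp, hm],
              show pvStep p [] x = [x] by simp [pvStep, hp],
              ih (acc ++ [x]), ih [x]]
          simp only [List.filter_append]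
          rw [show List.filter (fun y => !(acc.contains y)) [x] = [x] by simp [hm]]
          rw [List.filter_filter, List.append_assoc, List.singleton_append]
          congr 2
          apply List.filter_congr
          intro y _
          by_cases hya : y ∈ acc
          · simp [hya, List.mem_append]
          · by_cases hyx : y = x
            · simp [hyx, hya, List.mem_append]
            · simp [hya, hyx, List.mem_append]
      · rw [show pvStep p acc x = acc by simp [pvStep, hp],
            show pvStep p [] x = [] by simp [pvStep, hp]]
        exact ih acc

-- PySem's first-occurrence dedup is the trivial-filter loop
theorem pvDedupEqFoldl (xs : List String) :
    PySem.List.dedup xs = xs.foldl (pvStep (fun _ => true)) [] := by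
  simp only [PySem.List.dedup, PySem.Set.ofList]
  have : ∀ (acc : List String),
      xs.foldl PySem.Set.add acc = xs.foldl (pvStep (fun _ => true)) acc := by
    induction xs with
    | nil => intro acc; rfl
    | cons x xs ih =>
        intro acc
        simp only [List.foldl_cons]
        rw [show PySem.Set.add acc x = pvStep (fun _ => true) acc x by
              simp only [PySem.Set.add, PySem.Set.contains, pvStep, Bool.true_and]
              by_cases h : acc.contains x = true <;> simp [h]]
        exact ih _
  exact this []

-- dedup's cons equation: keep the head, drop later copies
theorem pvDedupCons (x : String) (xs : List String) :
    PySem.List.dedup (x :: xs)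
      = x :: (PySem.List.dedup xs).filter (fun y => !(y == x)) := by
  rw [pvDedupEqFoldl, pvDedupEqFoldl]
  simp only [List.foldl_cons]
  rw [show pvStep (fun _ => true) [] x = [x] by simp [pvStep]]
  rw [pvStepAcc, List.singleton_append]
  congr 1
  apply List.filter_congr
  intro y _
  by_cases hyx : y = x <;> simp [hyx]

-- the filtering loop is dedup-then-filter
theorem pvFoldlStepEqFilterDedup (p : String → Bool) (xs : List String) :
    xs.foldl (pvStep p) [] = (PySem.List.dedup xs).filter p := by
  induction xs with
  | nil => rfl
  | cons x xs ih =>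
      simp only [List.foldl_cons]
      rw [pvDedupCons]
      by_cases hp : p x = true
      · rw [show pvStep p [] x = [x] by simp [pvStep, hp]]
        rw [pvStepAcc, ih]
        simp only [List.filter_cons, hp, if_pos, List.singleton_append]
        congr 1
        rw [List.filter_filter, List.filter_filter]
        apply List.filter_congr
        intro y _
        by_cases hyx : y = x
        · simp [hyx]
        · simp [hyx, Bool.and_comm]
      · rw [show pvStep p [] x = [] by simp [pvStep, hp]]
        rw [ih]
        simp only [List.filter_cons, hp]
        rw [List.filter_filter]
        apply List.filter_congr
        intro y _
        by_cases hyx : y = x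
        · simp [hyx, hp]
        · simp [hyx]

-- A's second loop, collapsed the same way (its condition has no filter)
theorem pvPairCollapse2 (xs : List String) (l : List String) :
    xs.foldl
      (fun (st : List String × PySem.Set String) name =>
        if !(PySem.Set.contains st.2 name) then
          (st.1 ++ [name], PySem.Set.add st.2 name)
        else st)
      (l, l)
      = (xs.foldl (pvStep (fun _ => true)) l, xs.foldl (pvStep (fun _ => true)) l) := by
  induction xs generalizing l with
  | nil => rfl
  | cons x xs ih =>
      rw [List.foldl_cons, List.foldl_cons]
      have hstep :
          (if !(PySem.Set.contains (Prod.snd ((l, l) : List String × PySem.Set String)) x) then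
            (Prod.fst ((l, l) : List String × PySem.Set String) ++ [x],
              PySem.Set.add (Prod.snd ((l, l) : List String × PySem.Set String)) x)
          else ((l, l) : List String × PySem.Set String))
            = ((pvStep (fun _ => true) l x, pvStep (fun _ => true) l x)
                : List String × PySem.Set String) := by
        by_cases h : List.contains l x = true
        · have hm : x ∈ l := by simpa using h
          simp [pvStep, PySem.Set.contains, PySem.Set.add, hm]
        · have hm : x ∉ l := by simpa using h
          simp [pvStep, PySem.Set.contains, PySem.Set.add, hm]
      rw [hstep]
      exact ih _

-- ===== A = pvM =====
theorem pvAEqM (existing : List String) (discovered : List String) :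
    merge_order existing discovered = pvM existing discovered := by
  show (discovered.foldl
      (fun (st : List String × PySem.Set String) name =>
        if !(PySem.Set.contains st.2 name) then
          (st.1 ++ [name], PySem.Set.add st.2 name)
        else st)
      (existing.foldl
        (fun (st : List String × PySem.Set String) name =>
          if discovered.contains name && !(PySem.Set.contains st.2 name) then
            (st.1 ++ [name], PySem.Set.add st.2 name)
          else st)
        (([] : List String), ([] : List String)))).1 = pvM existing discovered
  rw [pvPairCollapse (fun name => discovered.contains name) existing []]
  rw [pvPairCollapse2 discovered
        (existing.foldl (pvStep (fun name => discovered.contains name)) [])]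
  simp only
  rw [pvStepAcc (fun _ => true) discovered]
  rw [pvFoldlStepEqFilterDedup, pvFoldlStepEqFilterDedup]
  unfold pvM
  congr 1
  rw [List.filter_filter]
  apply List.filter_congr
  intro y hy
  have hyd : y ∈ discovered := (PySem.List.mem_dedup discovered y).mp hy
  by_cases hye : y ∈ existing
  · simp [List.mem_filter, PySem.List.mem_dedup, hye, hyd]
  · simp [List.mem_filter, PySem.List.mem_dedup, hye]

-- ===== B = pvM =====

-- what the setdefault loop's dictionary answers: the FIRST index of n, offset by the start s
theorem pvPosGet (xs : List String) (n : String) :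
    ∀ (s : Int) (d : PySem.Dict String Int),
    (((PySem.List.enumerate xs s).foldl
        (fun d p => if (d.get? p.2).isSome then d else d.insert p.2 p.1) d).get? n)
      = match d.get? n with
        | some v => some v
        | none => if n ∈ xs then some (s + (List.idxOf n xs : Int)) else none := by
  induction xs with
  | nil =>
      intro s d
      simp only [PySem.List.enumerate_nil, List.foldl_nil, List.not_mem_nil, if_neg,
        not_false_iff]
      cases d.get? n <;> simp
  | cons x xs ih =>
      intro s d
      rw [PySem.List.enumerate_cons]
      simp only [List.foldl_cons]
      by_cases hx : (d.get? x).isSome = true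
      · rw [if_pos hx, ih (s + 1) d]
        rcases hdn : d.get? n with _ | v
        · simp only
          by_cases hxn : x = n
          · rw [hxn] at hx; rw [hdn] at hx; simp at hx
          · have hnx' : n ≠ x := fun h => hxn h.symm
            have hmem : n ∈ x :: xs ↔ n ∈ xs := by
              rw [List.mem_cons]
              simp [hnx']
            by_cases hnx : n ∈ xs
            · rw [if_pos hnx, if_pos (hmem.mpr hnx)]
              rw [pvIdxOfConsNe x n xs hxn]
              push_cast
              ring_nf
            · rw [if_neg hnx, if_neg (fun h => hnx (hmem.mp h))]
        · simp
      · rw [if_neg hx, ih (s + 1) (d.insert x s)]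
        by_cases hxn : x = n
        · subst hxn
          rw [PySem.Dict.get?_insert_self]
          have hdn : d.get? x = none := by
            cases h : d.get? x
            · rfl
            · rw [h] at hx; simp at hx
          rw [hdn]
          simp only
          rw [if_pos (List.mem_cons_self)]
          simp [List.idxOf_cons_self]
        · rw [PySem.Dict.get?_insert_of_ne d s (Ne.symm hxn)]
          rcases hdn : d.get? n with _ | v
          · simp only
            have hnx' : n ≠ x := fun h => hxn h.symm
            have hmem : n ∈ x :: xs ↔ n ∈ xs := by
              rw [List.mem_cons]
              simp [hnx']
            by_cases hnx : n ∈ xs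
            · rw [if_pos hnx, if_pos (hmem.mpr hnx)]
              rw [pvIdxOfConsNe x n xs hxn]
              push_cast
              ring_nf
            · rw [if_neg hnx, if_neg (fun h => hnx (hmem.mp h))]
          · simp

-- a nodup list ranks its own elements by position
theorem pvNodupPairwiseIdxOf (l : List String) (h : l.Nodup) :
    l.Pairwise (fun a b => List.idxOf a l < List.idxOf b l) := by
  rw [List.pairwise_iff_getElem]
  intro i j hi hj hij
  rw [List.Nodup.idxOf_getElem h i hi, List.Nodup.idxOf_getElem h j hj]
  exact hij

-- dedup keeps first occurrences in order of first index
theorem pvDedupPairwiseIdxOf (xs : List String) :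
    (PySem.List.dedup xs).Pairwise
      (fun a b => List.idxOf a xs < List.idxOf b xs) := by
  induction xs with
  | nil => simp [PySem.List.dedup, PySem.Set.ofList]
  | cons x xs ih =>
      rw [pvDedupCons]
      constructor
      · intro b hb
        have hb' : b ∈ PySem.List.dedup xs ∧ b ≠ x := by
          simpa using (List.mem_filter.mp hb)
        rw [pvIdxOfConsNe x b xs (fun h => hb'.2 h.symm), List.idxOf_cons_self]
        omega
      · refine List.Pairwise.imp_of_mem ?_ (List.Pairwise.filter _ ih)
        intro a b ha hb hab
        have ha' : a ≠ x := by simpa using (List.mem_filter.mp ha).2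
        have hb' : b ≠ x := by simpa using (List.mem_filter.mp hb).2
        rw [pvIdxOfConsNe x a xs (fun h => ha' h.symm),
            pvIdxOfConsNe x b xs (fun h => hb' h.symm)]
        omega

-- pvM is nodup with the same members as dedup discovered, hence a permutation of it
theorem pvMPermDedup (existing : List String) (discovered : List String) :
    (pvM existing discovered).Perm (PySem.List.dedup discovered) := by
  have hnodup : (pvM existing discovered).Nodup := by
    unfold pvM
    rw [List.nodup_append]
    refine ⟨(PySem.List.nodup_dedup existing).filter _,
      (PySem.List.nodup_dedup discovered).filter _, ?_⟩
    intro a ha b hb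
    intro heq
    have ha' : a ∈ existing := by
      have := (List.mem_filter.mp ha).1
      exact (PySem.List.mem_dedup existing a).mp this
    have hb' : ¬ b ∈ existing := by
      have := (List.mem_filter.mp hb).2
      simpa using this
    exact hb' (heq ▸ ha')
  rw [List.perm_ext_iff_of_nodup hnodup (PySem.List.nodup_dedup discovered)]
  intro a
  unfold pvM
  simp only [List.mem_append, List.mem_filter, PySem.List.mem_dedup]
  constructor
  · rintro (⟨_, h⟩ | ⟨h, _⟩)
    · simpa using h
    · exact h
  · intro h
    by_cases he : a ∈ existing
    · exact Or.inl ⟨he, by simpa using h⟩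
    · exact Or.inr ⟨h, by simpa using he⟩

-- the keys B attaches are strictly increasing along pvM
theorem pvMPairwiseKey (existing : List String) (discovered : List String) :
    (pvM existing discovered).Pairwise
      (fun a b => pvKey existing (PySem.List.dedup discovered) a
                < pvKey existing (PySem.List.dedup discovered) b) := by
  unfold pvM
  rw [List.pairwise_append]
  refine ⟨?_, ?_, ?_⟩
  · refine List.Pairwise.imp_of_mem ?_ (List.Pairwise.filter _ (pvDedupPairwiseIdxOf existing))
    intro a b ha hb hab
    have ha' : a ∈ existing :=
      (PySem.List.mem_dedup existing a).mp (List.mem_filter.mp ha).1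
    have hb' : b ∈ existing :=
      (PySem.List.mem_dedup existing b).mp (List.mem_filter.mp hb).1
    simp only [pvKey, if_pos ha', if_pos hb']
    exact_mod_cast hab
  · refine List.Pairwise.imp_of_mem ?_
      (List.Pairwise.filter _
        (pvNodupPairwiseIdxOf _ (PySem.List.nodup_dedup discovered)))
    intro a b ha hb hab
    have ha' : ¬ a ∈ existing := by simpa using (List.mem_filter.mp ha).2
    have hb' : ¬ b ∈ existing := by simpa using (List.mem_filter.mp hb).2
    simp only [pvKey, if_neg ha', if_neg hb']
    have : (List.idxOf a (PySem.List.dedup discovered) : Int)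
         < (List.idxOf b (PySem.List.dedup discovered) : Int) := by exact_mod_cast hab
    omega
  · intro a ha b hb
    have ha' : a ∈ existing :=
      (PySem.List.mem_dedup existing a).mp (List.mem_filter.mp ha).1
    have hb' : ¬ b ∈ existing := by simpa using (List.mem_filter.mp hb).2
    simp only [pvKey, if_pos ha', if_neg hb']
    have h1 : List.idxOf a existing < existing.length :=
      List.idxOf_lt_length_of_mem ha'
    have h2 : (0 : Int) ≤ (List.idxOf b (PySem.List.dedup discovered) : Int) := by
      exact_mod_cast Nat.zero_le _
    have h1' : (List.idxOf a existing : Int) < (existing.length : Int) := by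
      exact_mod_cast h1
    omega

-- B's keyed input list is pvKey attached pointwise to dedup discovered
theorem pvKeyedEqMap (existing : List String) (discovered : List String) :
    (PySem.List.enumerate (PySem.List.dedup discovered)).map
      (fun p =>
        (((PySem.List.enumerate existing).foldl
            (fun d p => if (d.get? p.2).isSome then d else d.insert p.2 p.1)
            PySem.Dict.empty).getD p.2 ((existing.length : Int) + p.1), p.2))
      = (PySem.List.dedup discovered).map
          (fun n => (pvKey existing (PySem.List.dedup discovered) n, n)) := by
  set dd := PySem.List.dedup discovered with hdd
  apply List.ext_getElem
  · simp [PySem.List.length_enumerate]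
  · intro k h1 h2
    have hk : k < dd.length := by
      simpa [PySem.List.length_enumerate] using h1
    simp only [List.getElem_map]
    rw [PySem.List.getElem_enumerate dd 0 k (by simpa [PySem.List.length_enumerate] using hk)]
    simp only [PySem.Dict.getD]
    rw [pvPosGet existing dd[k] 0 PySem.Dict.empty]
    have hempty : (PySem.Dict.empty : PySem.Dict String Int).get? dd[k] = none := rfl
    rw [hempty]
    by_cases hmem : dd[k] ∈ existing
    · simp only [if_pos hmem, pvKey, Option.getD_some, zero_add]
    · simp only [if_neg hmem, pvKey, Option.getD_none]
      have : List.idxOf dd[k] dd = k :=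
        List.Nodup.idxOf_getElem (hdd ▸ PySem.List.nodup_dedup discovered) k hk
      rw [this]
      ring

-- ===== B = pvM =====
theorem pvBEqM (existing : List String) (discovered : List String) :
    merge_order_alt existing discovered = pvM existing discovered := by
  unfold merge_order_alt
  simp only
  rw [pvKeyedEqMap existing discovered]
  rw [PySem.List.sorted_eq_of_perm_of_pairwise_lt
        ((PySem.List.dedup discovered).map
          (fun n => (pvKey existing (PySem.List.dedup discovered) n, n)))
        ((pvM existing discovered).map
          (fun n => (pvKey existing (PySem.List.dedup discovered) n, n)))
        (fun pair => pair.1)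
        (List.Perm.map _ (pvMPermDedup existing discovered))
        (by rw [List.pairwise_map]; exact pvMPairwiseKey existing discovered)]
  rw [List.map_map]
  simp [Function.comp_def]

-- ===== VERDICT (by name: the statement is the Claim_ definition above) =====
theorem merge_order_spec : Claim_equal_merge_order := by
  intro existing discovered _
  unfold Spec_merge_order
  rw [pvAEqM, pvBEqM]
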